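-- pv_equiv track=rewrite | github.com/GiantCupcake/SlackBotKaleidos | command_line.py | points_per_words
-- ===== SOURCE A (Python) =====
-- def points_per_words(valid_words):
--     valeur = dict()
--     for words in valid_words:
--         for word in words:
--             if word not in valeur:
--                 valeur[word] = 4
--             else:
--                 valeur[word] = 1
--     return valeur
-- ===== SOURCE B (Python) =====
-- def points_per_words(valid_words):
--     words = [w for ws in valid_words for w in ws]
--     counts = {}
--     for w in words:
--         counts[w] = counts.get(w, 0) + 1
--     return {w: 4 if c == 1 else 1 for w, c in counts.items()}
-- ===== Notes on version B (the rewrite author's own statement) =====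
-- stated objective: alternative
-- what changed: Replaces A's single stateful pass (which overwrites 4 with 1 on a word's second sighting) with a count-then-classify decomposition: flatten, build a frequency dict, then map count==1 to 4 and count>=2 to 1.
import Mathlib
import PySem

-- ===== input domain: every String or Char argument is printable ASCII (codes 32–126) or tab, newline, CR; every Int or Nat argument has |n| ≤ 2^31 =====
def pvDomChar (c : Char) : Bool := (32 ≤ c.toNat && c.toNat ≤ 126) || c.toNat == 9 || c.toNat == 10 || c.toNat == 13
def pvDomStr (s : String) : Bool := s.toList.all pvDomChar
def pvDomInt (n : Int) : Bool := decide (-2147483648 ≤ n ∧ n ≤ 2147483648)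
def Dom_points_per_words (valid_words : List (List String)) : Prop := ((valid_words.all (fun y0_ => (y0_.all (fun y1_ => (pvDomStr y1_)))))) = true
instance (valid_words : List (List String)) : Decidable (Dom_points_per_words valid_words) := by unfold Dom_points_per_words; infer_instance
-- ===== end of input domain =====

-- B replaces A's single stateful overwrite pass with a flatten / count / classify decomposition (alternative, same cost).

-- ===== PORT A =====
-- one word of A's inner loop: if word not in valeur: valeur[word] = 4 else: valeur[word] = 1
def pvStepA (valeur : PySem.Dict String Int) (word : String) : PySem.Dict String Int :=
  if valeur.contains word = false then valeur.insert word 4 else valeur.insert word 1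

def points_per_words (valid_words : List (List String)) : List (String × Int) :=
  (valid_words.foldl (fun valeur words => words.foldl pvStepA valeur) PySem.Dict.empty).items

-- ===== PORT B =====
def points_per_words_alt (valid_words : List (List String)) : List (String × Int) :=
  let words := valid_words.flatMap (fun ws => ws)
  let counts := words.foldl (fun d w => d.insert w (d.getD w 0 + 1))
    (PySem.Dict.empty : PySem.Dict String Int)
  counts.items.map (fun p => (p.1, if p.2 = 1 then (4 : Int) else 1))

-- ===== PRECONDITION & SPEC =====
def Spec_points_per_words (valid_words : List (List String)) (out : List (String × Int)) : Prop := out = points_per_words_alt valid_words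
instance (valid_words : List (List String)) (out : List (String × Int)) : Decidable (Spec_points_per_words valid_words out) := by unfold Spec_points_per_words; infer_instance

-- ===== CLAIM (what is proved, stated in full; the proofs are below) =====
def Claim_equal_points_per_words : Prop := ∀ (valid_words : List (List String)), Dom_points_per_words valid_words → Spec_points_per_words valid_words (points_per_words valid_words)

-- ===== LEMMAS AND PROOFS =====

-- A's branch is an insert of a conditional value
theorem pvStepA_eq (d : PySem.Dict String Int) (w : String) :
    pvStepA d w = d.insert w (if d.contains w then 1 else 4) := by
  unfold pvStepA
  by_cases h : d.contains w = true <;> simp [h]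

-- A's nested loops are one loop over the flattened word list
theorem foldA_flatten (lss : List (List String)) (d : PySem.Dict String Int) :
    lss.foldl (fun valeur words => words.foldl pvStepA valeur) d
      = (lss.flatMap (fun ws => ws)).foldl pvStepA d := by
  induction lss generalizing d with
  | nil => rfl
  | cons ws t ih => simp [List.foldl_append, ih]

theorem keysA (l : List String) :
    (l.foldl pvStepA PySem.Dict.empty).keys = PySem.Set.ofList l := by
  rw [PySem.List.foldl_congr_mem l pvStepA
        (fun d w => d.insert w (if d.contains w then 1 else 4)) PySem.Dict.empty
        (fun acc x _ => pvStepA_eq acc x),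
      PySem.Dict.keys_foldl_insert]
  simp [PySem.Dict.keys_empty, PySem.Set.update, PySem.Set.ofList_eq_foldl]

-- A's accumulated dict, characterised: first-occurrence keys, value 4 iff the word is unique so far
theorem itemsA (l : List String) :
    (l.foldl pvStepA PySem.Dict.empty).items
      = (PySem.Set.ofList l).map (fun k => (k, if l.count k = 1 then (4 : Int) else 1)) := by
  induction l using List.reverseRecOn with
  | nil => rfl
  | append_singleton l x ih =>
    rw [List.foldl_append]
    simp only [List.foldl_cons, List.foldl_nil]
    have hkeys := keysA l
    by_cases hx : x ∈ l
    · have hc : (l.foldl pvStepA PySem.Dict.empty).contains x = true := by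
        rw [PySem.Dict.contains_iff_mem_keys, hkeys, PySem.Set.mem_ofList]; exact hx
      have hstep : ∀ d : PySem.Dict String Int, d.contains x = true →
          pvStepA d x = d.insert x 1 := by
        intro d h; unfold pvStepA; rw [h]; simp
      rw [hstep _ hc, PySem.Dict.items_insert_of_contains _ _ hc, ih,
        PySem.Set.ofList_append_singleton,
        PySem.Set.add_of_mem (by rw [PySem.Set.mem_ofList]; exact hx), List.map_map]
      apply List.map_congr_left
      intro k hk
      rw [PySem.Set.mem_ofList] at hk
      by_cases hkx : k = x
      · subst hkx
        have h1 : 1 ≤ l.count k := List.one_le_count_iff.mpr hk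
        simp [Function.comp]
        omega
      · have h2 : (l ++ [x]).count k = l.count k := by
          rw [List.count_append]; simp [Ne.symm hkx]
        simp [Function.comp, hkx, h2]
    · have hc : (l.foldl pvStepA PySem.Dict.empty).contains x = false := by
        rw [← Bool.not_eq_true, PySem.Dict.contains_iff_mem_keys, hkeys, PySem.Set.mem_ofList]
        exact hx
      have hstep : ∀ d : PySem.Dict String Int, d.contains x = false →
          pvStepA d x = d.insert x 4 := by
        intro d h; unfold pvStepA; rw [h]; simp
      rw [hstep _ hc, PySem.Dict.items_insert_of_not_contains _ _ hc, ih,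
        PySem.Set.ofList_append_singleton,
        PySem.Set.add_of_not_mem (by rw [PySem.Set.mem_ofList]; exact hx), List.map_append]
      congr 1
      · apply List.map_congr_left
        intro k hk
        rw [PySem.Set.mem_ofList] at hk
        have hkx : k ≠ x := fun h => hx (h ▸ hk)
        have h2 : (l ++ [x]).count k = l.count k := by
          rw [List.count_append]; simp [Ne.symm hkx]
        simp [h2]
      · have h0 : l.count x = 0 := List.count_eq_zero.mpr hx
        simp [List.count_append, h0]

-- B's counting loop is Counter over the flattened list
theorem itemsB (valid_words : List (List String)) :
    points_per_words_alt valid_words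
      = (PySem.Set.ofList (valid_words.flatMap (fun ws => ws))).map
          (fun k => (k, if (valid_words.flatMap (fun ws => ws)).count k = 1 then (4 : Int) else 1)) := by
  show ((valid_words.flatMap (fun ws => ws)).foldl
          (fun d w => d.insert w (d.getD w 0 + 1))
          (PySem.Dict.empty : PySem.Dict String Int)).items.map
        (fun p => (p.1, if p.2 = 1 then (4 : Int) else 1)) = _
  rw [PySem.Dict.foldl_insert_getD_add_one_eq_counter, PySem.Dict.items_counter, List.map_map]
  apply List.map_congr_left
  intro k _
  simp only [Function.comp]
  by_cases h : (valid_words.flatMap (fun ws => ws)).count k = 1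
  · rw [if_pos (by exact_mod_cast h), if_pos h]
  · rw [if_neg (by exact_mod_cast h), if_neg h]

-- ===== VERDICT (by name: the statement is the Claim_ definition above) =====
theorem points_per_words_spec : Claim_equal_points_per_words := by
  intro valid_words _
  unfold Spec_points_per_words points_per_words
  rw [foldA_flatten, itemsA, itemsB]
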